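-- pv_equiv track=rewrite | github.com/hacker05090204-ops/YGB | backend/sync/manifest.py | diff_manifests
-- ===== SOURCE A (Python) =====
-- from typing import Dict, List, Optional
--
-- def diff_manifests(
--     current: Dict[str, dict],
--     previous: Dict[str, dict],
-- ) -> Dict[str, Dict[str, dict]]:
--     """
--     Compute delta between two file dictionaries.
--     Returns: {added: {path: entry}, modified: {path: entry}, deleted: {path: entry}}
--     """
--     added = {k: v for k, v in current.items() if k not in previous}
--     deleted = {k: v for k, v in previous.items() if k not in current}
--     modified = {
--         k: v for k, v in current.items()
--         if k in previous and v.get("hash") != previous[k].get("hash")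
--     }
--     return {"added": added, "modified": modified, "deleted": deleted}
-- ===== SOURCE B (Python) =====
-- def diff_manifests(current, previous):
--     remaining = dict(previous)
--     added = {}
--     modified = {}
--     for k, v in current.items():
--         if k in remaining:
--             pv = remaining.pop(k)
--             if v.get("hash") != pv.get("hash"):
--                 modified[k] = v
--         else:
--             added[k] = v
--     return {"added": added, "modified": modified, "deleted": remaining}
-- ===== Notes on version B (the rewrite author's own statement) =====
-- stated objective: alternative
-- what changed: B copies previous into a working dict and destructively pops each matched key during a single classifying pass over current, so deleted is the leftover of that working dict and no membership test over current is ever performed; Pre_ excludes association lists with duplicate keys, which do not correspond to any Python dict and on which A's first-match lookups and B's copy-and-pop semantics are both accidental.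
import Mathlib
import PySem

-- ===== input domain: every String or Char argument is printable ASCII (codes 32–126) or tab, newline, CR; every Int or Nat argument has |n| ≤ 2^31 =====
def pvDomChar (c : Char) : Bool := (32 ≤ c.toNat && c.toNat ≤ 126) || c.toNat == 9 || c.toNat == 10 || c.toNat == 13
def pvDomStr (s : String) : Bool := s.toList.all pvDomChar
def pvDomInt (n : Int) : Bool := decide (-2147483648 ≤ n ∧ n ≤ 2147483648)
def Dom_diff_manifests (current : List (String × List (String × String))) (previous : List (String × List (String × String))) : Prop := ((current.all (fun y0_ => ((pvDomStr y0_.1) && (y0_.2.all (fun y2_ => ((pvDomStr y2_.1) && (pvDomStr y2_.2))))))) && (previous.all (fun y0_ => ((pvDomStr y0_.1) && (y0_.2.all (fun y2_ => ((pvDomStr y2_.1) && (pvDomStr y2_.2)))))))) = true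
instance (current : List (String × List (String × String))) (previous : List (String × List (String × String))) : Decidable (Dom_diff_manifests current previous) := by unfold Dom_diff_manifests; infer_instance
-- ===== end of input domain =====

-- B copies previous into a working dict and pops each matched key in one classifying pass over current; deleted is the leftover dict (no membership scan over current). Pre_ excludes duplicate-key assoc lists (not representable as Python dicts).


-- ===== PORT A =====
-- First-match association-list lookup: Python's dict lookup / .get under the type convention.
def aGet {α : Type} (d : List (String × α)) (k : String) : Option α :=
  (d.find? (fun kv => kv.1 == k)).map (fun kv => kv.2)

def diff_manifests (current : List (String × List (String × String))) (previous : List (String × List (String × String))) : List (String × List (String × List (String × String))) :=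
  let added := current.filter (fun kv => (aGet previous kv.1).isNone)
  let deleted := previous.filter (fun kv => (aGet current kv.1).isNone)
  let modified := current.filter (fun kv =>
    match aGet previous kv.1 with
    | none => false
    | some pv => aGet kv.2 "hash" != aGet pv "hash")
  [("added", added), ("modified", modified), ("deleted", deleted)]

-- ===== PORT B =====
-- dict.pop k: remove the entry with key k (unique under Pre_; first match, exact there).
def popKey {α : Type} (d : List (String × α)) (k : String) : List (String × α) :=
  d.eraseP (fun kv => kv.1 == k)

-- one step of B's classifying loop; state = (remaining, added, modified)
def bStep (st : List (String × List (String × String)) × List (String × List (String × String)) × List (String × List (String × String)))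
    (kv : String × List (String × String)) :
    List (String × List (String × String)) × List (String × List (String × String)) × List (String × List (String × String)) :=
  match aGet st.1 kv.1 with
  | some pv =>
      (popKey st.1 kv.1, st.2.1,
        if aGet kv.2 "hash" != aGet pv "hash" then st.2.2 ++ [kv] else st.2.2)
  | none => (st.1, st.2.1 ++ [kv], st.2.2)

def diff_manifests_alt (current : List (String × List (String × String))) (previous : List (String × List (String × String))) : List (String × List (String × List (String × String))) :=
  let st := current.foldl bStep (previous, [], [])
  [("added", st.2.1), ("modified", st.2.2), ("deleted", st.1)]

-- ===== PRECONDITION & SPEC =====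
-- Pre_ excludes association lists with duplicate keys: they do not correspond to any Python dict,
-- and on them A's first-match lookups and B's copy-and-pop semantics are both accidental.
def Pre_diff_manifests (current : List (String × List (String × String))) (previous : List (String × List (String × String))) : Prop :=
  (current.map Prod.fst).Nodup ∧ (previous.map Prod.fst).Nodup
instance (current : List (String × List (String × String))) (previous : List (String × List (String × String))) : Decidable (Pre_diff_manifests current previous) := by unfold Pre_diff_manifests; infer_instance

def pvWitness_diff_manifests : (List (String × List (String × String))) × (List (String × List (String × String))) :=
  ([("a", [("hash", "1")]), ("c", [])], [("a", [("hash", "2")]), ("b", [("hash", "1")])])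

def Spec_diff_manifests (current : List (String × List (String × String))) (previous : List (String × List (String × String))) (out : List (String × List (String × List (String × String)))) : Prop := out = diff_manifests_alt current previous
instance (current : List (String × List (String × String))) (previous : List (String × List (String × String))) (out : List (String × List (String × List (String × String)))) : Decidable (Spec_diff_manifests current previous out) := by unfold Spec_diff_manifests; infer_instance

-- ===== CLAIM (what is proved, stated in full; the proofs are below) =====
def Claim_equal_diff_manifests : Prop := ∀ (current : List (String × List (String × String))) (previous : List (String × List (String × String))), Dom_diff_manifests current previous → Pre_diff_manifests current previous → Spec_diff_manifests current previous (diff_manifests current previous)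

-- ===== LEMMAS AND PROOFS =====
lemma beq_comm_str (a b : String) : (a == b) = (b == a) := by
  by_cases h : a = b
  · simp [h]
  · have h' : ¬ b = a := fun e => h e.symm
    simp [h, h']

lemma aGet_cons {α : Type} (c : String × α) (l : List (String × α)) (k : String) :
    aGet (c :: l) k = if c.1 == k then some c.2 else aGet l k := by
  by_cases h : (c.1 == k) = true
  · simp [aGet, List.find?_cons, h]
  · simp [aGet, List.find?_cons, h]

lemma aGet_filter {α : Type} (q : String → Bool) (l : List (String × α)) (k : String)
    (hq : q k = true) :
    aGet (l.filter (fun kv => q kv.1)) k = aGet l k := by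
  induction l with
  | nil => rfl
  | cons kv rest ih =>
    rw [List.filter_cons]
    by_cases hqk : q kv.1 = true
    · rw [if_pos (by simp [hqk]), aGet_cons, aGet_cons]
      by_cases h : kv.1 = k <;> simp [h, ih]
    · rw [if_neg (by simp [hqk]), ih, aGet_cons]
      have h : kv.1 ≠ k := fun e => hqk (e ▸ hq)
      simp [h]

lemma eraseP_eq_filter_keys {α : Type} (l : List (String × α)) (k : String)
    (h : (l.map Prod.fst).Nodup) :
    l.eraseP (fun kv => kv.1 == k) = l.filter (fun kv => !(kv.1 == k)) := by
  induction l with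
  | nil => rfl
  | cons kv rest ih =>
    simp only [List.map_cons, List.nodup_cons] at h
    by_cases hk : kv.1 = k
    · have : rest.filter (fun kv' => !(kv'.1 == k)) = rest := by
        apply List.filter_eq_self.mpr
        intro x hx
        have : x.1 ≠ k := by
          intro e
          apply h.1
          have hm := List.mem_map_of_mem (f := Prod.fst) hx
          rw [e, ← hk] at hm
          exact hm
        simp [this]
      simp [List.eraseP_cons, List.filter_cons, hk, this]
    · simp [List.eraseP_cons, List.filter_cons, hk, ih h.2]

lemma aGet_isSome_of_mem {α : Type} {l : List (String × α)} {kv : String × α} (h : kv ∈ l) :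
    (aGet l kv.1).isSome = true := by
  induction l with
  | nil => cases h
  | cons c rest ih =>
    rw [aGet_cons]
    by_cases e : c.1 = kv.1
    · simp [e]
    · rcases List.mem_cons.mp h with h1 | h1
      · exact absurd (congrArg Prod.fst h1).symm e
      · rw [if_neg (by simp [e])]
        exact ih h1

lemma aGet_isNone_iff {α : Type} (l : List (String × α)) (k : String) :
    (aGet l k).isNone = l.all (fun kv => !(kv.1 == k)) := by
  induction l with
  | nil => rfl
  | cons c rest ih =>
    rw [aGet_cons, List.all_cons]
    by_cases e : c.1 = k
    · simp [e]
    · rw [if_neg (by simp [e]), ih]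
      simp [show (c.1 == k) = false by simp [e]]

-- B's loop over current computed on prev filtered by a key predicate q that still admits every key of cur.
lemma bLoop (prev : List (String × List (String × String)))
    (hprev : (prev.map Prod.fst).Nodup) :
    ∀ (cur : List (String × List (String × String))) (q : String → Bool)
      (A M : List (String × List (String × String))),
      (cur.map Prod.fst).Nodup →
      (∀ kv ∈ cur, q kv.1 = true) →
      cur.foldl bStep (prev.filter (fun kv => q kv.1), A, M) =
        (prev.filter (fun kv => q kv.1 && cur.all (fun c => !(c.1 == kv.1) || (aGet prev c.1).isNone)),
         A ++ cur.filter (fun kv => (aGet prev kv.1).isNone),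
         M ++ cur.filter (fun kv =>
           match aGet prev kv.1 with
           | none => false
           | some pv => aGet kv.2 "hash" != aGet pv "hash")) := by
  intro cur
  induction cur with
  | nil => intro q A M _ _; simp
  | cons c rest ih =>
    intro q A M hnd hq
    simp only [List.map_cons, List.nodup_cons] at hnd
    have hqc : q c.1 = true := hq c (List.mem_cons_self ..)
    have hget : aGet (prev.filter (fun kv => q kv.1)) c.1 = aGet prev c.1 :=
      aGet_filter q prev c.1 hqc
    have hndf : ((prev.filter (fun kv => q kv.1)).map Prod.fst).Nodup :=
      hprev.sublist (List.filter_sublist.map Prod.fst)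
    rw [List.foldl_cons]
    cases hp : aGet prev c.1 with
    | none =>
      have hstep : bStep (prev.filter (fun kv => q kv.1), A, M) c =
          (prev.filter (fun kv => q kv.1), A ++ [c], M) := by
        simp only [bStep, hget, hp]
      rw [hstep, ih q (A ++ [c]) M hnd.2 (fun kv h => hq kv (List.mem_cons_of_mem _ h))]
      simp [hp, List.all_cons]
    | some pv =>
      have hpop : popKey (prev.filter (fun kv => q kv.1)) c.1 =
          prev.filter (fun kv => q kv.1 && !(kv.1 == c.1)) := by
        rw [popKey, eraseP_eq_filter_keys _ _ hndf, List.filter_filter]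
        exact List.filter_congr fun a _ => Bool.and_comm _ _
      have hstep : bStep (prev.filter (fun kv => q kv.1), A, M) c =
          (prev.filter (fun kv => q kv.1 && !(kv.1 == c.1)), A,
            if (aGet c.2 "hash" != aGet pv "hash") = true then M ++ [c] else M) := by
        simp only [bStep, hget, hp]
        rw [hpop]
      have hq' : ∀ kv ∈ rest, (q kv.1 && !(kv.1 == c.1)) = true := by
        intro kv h
        have : kv.1 ≠ c.1 := by
          intro e; exact hnd.1 (e ▸ List.mem_map_of_mem h)
        simp [hq kv (List.mem_cons_of_mem _ h), this]
      have key_comm : ∀ kv : String × List (String × String),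
          (!(kv.1 == c.1) : Bool) = (!(c.1 == kv.1) || (aGet prev c.1).isNone) := by
        intro kv; rw [beq_comm_str, hp]; simp
      rw [hstep]
      by_cases hh : (aGet c.2 "hash" != aGet pv "hash") = true
      · rw [if_pos hh, ih (fun s => q s && !(s == c.1)) A (M ++ [c]) hnd.2 hq']
        refine congrArg₂ _ ?_ (congrArg₂ _ ?_ ?_)
        · apply List.filter_congr; intro kv _
          rw [key_comm kv]; simp [Bool.and_assoc, List.all_cons]
        · simp [List.filter_cons, hp]
        · simp [List.filter_cons, hp, hh]
      · rw [if_neg hh, ih (fun s => q s && !(s == c.1)) A M hnd.2 hq']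
        refine congrArg₂ _ ?_ (congrArg₂ _ ?_ ?_)
        · apply List.filter_congr; intro kv _
          rw [key_comm kv]; simp [Bool.and_assoc, List.all_cons]
        · simp [List.filter_cons, hp]
        · simp [List.filter_cons, hp, hh]

-- ===== VERDICT (by name: the statement is the Claim_ definition above) =====
theorem diff_manifests_spec : Claim_equal_diff_manifests := by
  intro current previous _ hpre
  unfold Spec_diff_manifests diff_manifests diff_manifests_alt
  have h := bLoop previous hpre.2 current (fun _ => true) [] [] hpre.1 (fun _ _ => rfl)
  simp only [List.filter_true] at h
  rw [h]
  simp only [List.nil_append, List.cons.injEq, Prod.mk.injEq, and_true, true_and]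
  apply List.filter_congr
  intro kv hmem
  have hsome := aGet_isSome_of_mem hmem
  rw [Bool.true_and, aGet_isNone_iff, Bool.eq_iff_iff]
  simp only [List.all_eq_true]
  constructor
  · intro h' c hc
    simp [h' c hc]
  · intro h' c hc
    have hco := h' c hc
    by_cases e : c.1 = kv.1
    · rw [e] at hco
      rw [Bool.or_eq_true] at hco
      rcases hco with h1 | h1
      · simp at h1
      · rw [Option.isNone_iff_eq_none] at h1
        rw [h1] at hsome; cases hsome
    · simp [e]
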